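-- pv_equiv track=rewrite | github.com/Ramavadhoota/fitflow | agents/coaching_agent.py | _solve_barriers
-- ===== SOURCE A (Python) =====
-- from typing import Dict, List, Any
--
-- def _solve_barriers(barriers: List[str]) -> Dict[str, str]:
--     """Provide solutions for identified barriers"""
--
--     solutions = {}
--
--     for barrier in barriers:
--         if "recovery" in barrier.lower():
--             solutions[barrier] = "Increase sleep by 30 min, reduce stress, ensure 1-2 rest days/week"
--         elif "motivation" in barrier.lower():
--             solutions[barrier] = "Try new exercises, train with friends, vary workout split"
--         elif "strength drop" in barrier.lower():
--             solutions[barrier] = "Take a deload week, check exercise form, ensure adequate nutrition"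
--         elif "weight" in barrier.lower():
--             solutions[barrier] = "Adjust caloric intake by 100-200 calories, increase water intake"
--         else:
--             solutions[barrier] = "Address this issue in your next training session"
--
--     return solutions
-- ===== SOURCE B (Python) =====
-- _TABLE = [
--     ("recovery", "Increase sleep by 30 min, reduce stress, ensure 1-2 rest days/week"),
--     ("motivation", "Try new exercises, train with friends, vary workout split"),
--     ("strength drop", "Take a deload week, check exercise form, ensure adequate nutrition"),
--     ("weight", "Adjust caloric intake by 100-200 calories, increase water intake"),
-- ]
--
-- _DEFAULT = "Address this issue in your next training session"
--
--
-- def _solve_barriers(barriers):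
--     # Stage 1: every barrier starts with the default solution.
--     solutions = {b: _DEFAULT for b in barriers}
--     # Stage 2: sweep the table from lowest to highest priority, overwriting
--     # matching entries; the last (highest-priority) overwrite wins, and
--     # overwriting a dict value keeps the key's insertion position.
--     for kw, sol in reversed(_TABLE):
--         for b in solutions:
--             if kw in b.lower():
--                 solutions[b] = sol
--     return solutions
-- ===== Notes on version B (the rewrite author's own statement) =====
-- stated objective: alternative
-- what changed: Instead of deciding each barrier's solution once via an ordered match, B first assigns the default to every barrier and then sweeps the keyword table in reverse priority order, overwriting matching entries so the highest-priority overwrite lands last.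
import Mathlib
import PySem

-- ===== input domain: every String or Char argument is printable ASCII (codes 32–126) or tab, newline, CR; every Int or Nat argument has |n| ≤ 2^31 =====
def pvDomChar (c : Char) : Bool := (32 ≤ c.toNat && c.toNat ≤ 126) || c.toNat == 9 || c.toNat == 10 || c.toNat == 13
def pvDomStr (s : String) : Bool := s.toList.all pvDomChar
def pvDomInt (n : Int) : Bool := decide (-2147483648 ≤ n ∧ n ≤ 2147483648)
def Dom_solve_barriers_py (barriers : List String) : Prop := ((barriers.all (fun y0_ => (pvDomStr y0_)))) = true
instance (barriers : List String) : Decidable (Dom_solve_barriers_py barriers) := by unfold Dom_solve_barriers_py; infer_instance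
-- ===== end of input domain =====

-- B replaces A's per-barrier if/elif decision by staged passes: first every barrier gets
-- the default, then the keyword table is swept in reverse priority order, overwriting
-- matching entries in place; return-value equivalence proved (alternative decomposition).

-- ===== PORT A =====
-- literal transliteration of A's loop: for each barrier, an if/elif chain on substring tests
def solve_barriers_py (barriers : List String) : List (String × String) :=
  (barriers.foldl (fun (solutions : PySem.Dict String String) (barrier : String) =>
    if PySem.Str.isIn "recovery" (PySem.Str.lower barrier) then
      solutions.insert barrier "Increase sleep by 30 min, reduce stress, ensure 1-2 rest days/week"
    else if PySem.Str.isIn "motivation" (PySem.Str.lower barrier) then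
      solutions.insert barrier "Try new exercises, train with friends, vary workout split"
    else if PySem.Str.isIn "strength drop" (PySem.Str.lower barrier) then
      solutions.insert barrier "Take a deload week, check exercise form, ensure adequate nutrition"
    else if PySem.Str.isIn "weight" (PySem.Str.lower barrier) then
      solutions.insert barrier "Adjust caloric intake by 100-200 calories, increase water intake"
    else
      solutions.insert barrier "Address this issue in your next training session")
    PySem.Dict.empty).items

-- ===== PORT B =====
-- the priority table _TABLE from Source B
def pvTable : List (String × String) :=
  [("recovery", "Increase sleep by 30 min, reduce stress, ensure 1-2 rest days/week"),
   ("motivation", "Try new exercises, train with friends, vary workout split"),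
   ("strength drop", "Take a deload week, check exercise form, ensure adequate nutrition"),
   ("weight", "Adjust caloric intake by 100-200 calories, increase water intake")]

def pvDefaultSolution : String := "Address this issue in your next training session"

-- one overwriting pass: 'for b in solutions: if kw in b.lower(): solutions[b] = sol'
-- (Python iterates the keys as they were when the loop starts; they never change)
def pvPass (kw sol : String) (d : PySem.Dict String String) : PySem.Dict String String :=
  d.keys.foldl (fun d' b =>
    if PySem.Str.isIn kw (PySem.Str.lower b) then d'.insert b sol else d') d

-- Source B: defaults comprehension, then the reversed-table sweep
def solve_barriers_py_alt (barriers : List String) : List (String × String) :=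
  (pvTable.reverse.foldl (fun d p => pvPass p.1 p.2 d)
    (barriers.foldl (fun (d : PySem.Dict String String) b => d.insert b pvDefaultSolution)
      PySem.Dict.empty)).items

-- ===== PRECONDITION & SPEC =====
def Spec_solve_barriers_py (barriers : List String) (out : List (String × String)) : Prop := out = solve_barriers_py_alt barriers
instance (barriers : List String) (out : List (String × String)) : Decidable (Spec_solve_barriers_py barriers out) := by unfold Spec_solve_barriers_py; infer_instance

-- ===== CLAIM (what is proved, stated in full; the proofs are below) =====
def Claim_equal_solve_barriers_py : Prop := ∀ (barriers : List String), Dom_solve_barriers_py barriers → Spec_solve_barriers_py barriers (solve_barriers_py barriers)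

-- ===== LEMMAS AND PROOFS =====

-- A's per-barrier decision, as a function of the barrier alone
def pvPick (b : String) : String :=
  if PySem.Str.isIn "recovery" (PySem.Str.lower b) then
    "Increase sleep by 30 min, reduce stress, ensure 1-2 rest days/week"
  else if PySem.Str.isIn "motivation" (PySem.Str.lower b) then
    "Try new exercises, train with friends, vary workout split"
  else if PySem.Str.isIn "strength drop" (PySem.Str.lower b) then
    "Take a deload week, check exercise form, ensure adequate nutrition"
  else if PySem.Str.isIn "weight" (PySem.Str.lower b) then
    "Adjust caloric intake by 100-200 calories, increase water intake"
  else
    "Address this issue in your next training session"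

-- get? through a 'insert each key with f key' loop
theorem pv_get?_foldl_insert (f : String → String) (l : List String)
    (d : PySem.Dict String String) (k : String) :
    (l.foldl (fun d b => d.insert b (f b)) d).get? k
      = if k ∈ l then some (f k) else d.get? k := by
  induction l generalizing d with
  | nil => simp
  | cons b bs ih =>
    simp only [List.foldl_cons, ih, PySem.Dict.get?_insert, List.mem_cons]
    by_cases hk : k ∈ bs
    · simp [hk]
    · by_cases he : k = b <;> simp [hk, he]

-- keys of a conditional-overwrite loop are unchanged when every iterated key is present
theorem pv_pass_keys_aux (cond : String → Bool) (sol : String) (l : List String)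
    (d : PySem.Dict String String) (h : ∀ b ∈ l, b ∈ d.keys) :
    (l.foldl (fun d' b => if cond b then d'.insert b sol else d') d).keys = d.keys := by
  induction l generalizing d with
  | nil => rfl
  | cons b bs ih =>
    simp only [List.foldl_cons]
    split
    · rw [ih]
      · exact PySem.Dict.keys_insert_of_contains d sol
          (by rw [PySem.Dict.contains_iff_mem_keys]; exact h b (List.mem_cons_self ..))
      · intro x hx
        rw [PySem.Dict.mem_keys_insert]
        exact Or.inr (h x (List.mem_cons_of_mem _ hx))
    · exact ih d (fun x hx => h x (List.mem_cons_of_mem _ hx))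

theorem pv_pass_keys (kw sol : String) (d : PySem.Dict String String) :
    (pvPass kw sol d).keys = d.keys :=
  pv_pass_keys_aux (fun b => PySem.Str.isIn kw (PySem.Str.lower b)) sol d.keys d (fun _ h => h)

-- get? through one conditional-overwrite loop
theorem pv_pass_get?_aux (cond : String → Bool) (sol : String) (l : List String)
    (d : PySem.Dict String String) (k : String) :
    (l.foldl (fun d' b => if cond b then d'.insert b sol else d') d).get? k
      = if k ∈ l ∧ cond k then some sol else d.get? k := by
  induction l generalizing d with
  | nil => simp
  | cons b bs ih =>
    simp only [List.foldl_cons, ih, List.mem_cons]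
    by_cases hm : k ∈ bs ∧ cond k = true
    · simp [hm]
    · by_cases he : k = b
      · subst he
        by_cases hc : cond k = true
        · simp [hc, hm]
        · simp [hc]
      · by_cases hc : cond b = true
        · simp [hm, hc, PySem.Dict.get?_insert, he]
        · simp [hm, hc, he]

theorem pv_pass_get? (kw sol : String) (d : PySem.Dict String String) (k : String) :
    (pvPass kw sol d).get? k
      = if k ∈ d.keys ∧ PySem.Str.isIn kw (PySem.Str.lower k) then some sol else d.get? k :=
  pv_pass_get?_aux (fun b => PySem.Str.isIn kw (PySem.Str.lower b)) sol d.keys d k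

-- A's dict and B's dict, named for the proof
def pvDictA (barriers : List String) : PySem.Dict String String :=
  barriers.foldl (fun d b => d.insert b (pvPick b)) PySem.Dict.empty

def pvDictB (barriers : List String) : PySem.Dict String String :=
  pvTable.reverse.foldl (fun d p => pvPass p.1 p.2 d)
    (barriers.foldl (fun (d : PySem.Dict String String) b => d.insert b pvDefaultSolution)
      PySem.Dict.empty)

theorem pv_A_items (barriers : List String) :
    solve_barriers_py barriers = (pvDictA barriers).items := by
  unfold solve_barriers_py pvDictA
  have hfun : (fun (solutions : PySem.Dict String String) (barrier : String) =>
      if PySem.Str.isIn "recovery" (PySem.Str.lower barrier) then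
        solutions.insert barrier "Increase sleep by 30 min, reduce stress, ensure 1-2 rest days/week"
      else if PySem.Str.isIn "motivation" (PySem.Str.lower barrier) then
        solutions.insert barrier "Try new exercises, train with friends, vary workout split"
      else if PySem.Str.isIn "strength drop" (PySem.Str.lower barrier) then
        solutions.insert barrier "Take a deload week, check exercise form, ensure adequate nutrition"
      else if PySem.Str.isIn "weight" (PySem.Str.lower barrier) then
        solutions.insert barrier "Adjust caloric intake by 100-200 calories, increase water intake"
      else
        solutions.insert barrier "Address this issue in your next training session")
      = fun (d : PySem.Dict String String) b => d.insert b (pvPick b) := by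
    funext d b
    unfold pvPick
    split_ifs <;> rfl
  rw [hfun]

theorem pv_keysA (barriers : List String) :
    (pvDictA barriers).keys = PySem.Set.ofList barriers := by
  unfold pvDictA
  rw [PySem.Dict.keys_foldl_insert]
  rfl

theorem pv_keysB (barriers : List String) :
    (pvDictB barriers).keys = PySem.Set.ofList barriers := by
  unfold pvDictB
  simp only [pvTable, List.reverse_cons, List.reverse_nil, List.nil_append,
    List.cons_append, List.foldl_cons, List.foldl_nil, pv_pass_keys]
  rw [PySem.Dict.keys_foldl_insert]
  rfl

theorem pv_get?A (barriers : List String) (k : String) (hk : k ∈ barriers) :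
    (pvDictA barriers).get? k = some (pvPick k) := by
  unfold pvDictA
  rw [pv_get?_foldl_insert]
  simp [hk]

theorem pv_get?B (barriers : List String) (k : String) (hk : k ∈ barriers) :
    (pvDictB barriers).get? k = some (pvPick k) := by
  unfold pvDictB
  simp only [pvTable, List.reverse_cons, List.reverse_nil, List.nil_append,
    List.cons_append, List.foldl_cons, List.foldl_nil]
  rw [pv_pass_get?, pv_pass_get?, pv_pass_get?, pv_pass_get?]
  simp only [pv_pass_keys]
  rw [PySem.Dict.keys_foldl_insert,
    pv_get?_foldl_insert (fun _ => pvDefaultSolution)]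
  have hmem : k ∈ PySem.Set.update (PySem.Dict.empty (κ := String) (ν := String)).keys barriers := by
    show k ∈ PySem.Set.ofList barriers
    exact (PySem.Set.mem_ofList ..).mpr hk
  unfold pvPick pvDefaultSolution
  split_ifs with h1 h2 h3 h4 <;> simp_all

theorem pv_nodup_keysA (barriers : List String) : (pvDictA barriers).keys.Nodup := by
  rw [pv_keysA]; exact PySem.Set.nodup_ofList barriers

theorem pv_nodup_keysB (barriers : List String) : (pvDictB barriers).keys.Nodup := by
  rw [pv_keysB]; exact PySem.Set.nodup_ofList barriers

-- ===== VERDICT (by name: the statement is the Claim_ definition above) =====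
theorem solve_barriers_py_spec : Claim_equal_solve_barriers_py := by
  intro barriers _
  unfold Spec_solve_barriers_py solve_barriers_py_alt
  rw [pv_A_items]
  show (pvDictA barriers).items = (pvDictB barriers).items
  rw [PySem.Dict.items_eq_map_keys _ (pv_nodup_keysA barriers) "",
      PySem.Dict.items_eq_map_keys _ (pv_nodup_keysB barriers) "",
      pv_keysA, pv_keysB]
  apply List.map_congr_left
  intro k hk
  have hkb : k ∈ barriers := (PySem.Set.mem_ofList ..).mp hk
  rw [PySem.Dict.getD_eq_get?_getD, PySem.Dict.getD_eq_get?_getD,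
      pv_get?A barriers k hkb, pv_get?B barriers k hkb]
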